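-- pv_equiv track=rewrite | github.com/ashleyrchen/EPIJudge | epi_judge_python/nearest_repeated_entries.py | textbook_inspired
-- ===== SOURCE A (Python) =====
-- import collections, math, functools
--
-- def textbook_inspired(paragraph):
-- # ------TEXTBOOK INSPIRED SOLUTION, O(n) time, O(d) space,
-- # where d is the number of distinct words
--     WordCounter = collections.namedtuple('WordCounter',
--                             ('MinDistance', 'LastSeenIdx'))
--     D, LP, result = dict(), len(paragraph), math.inf
--     if LP < 2:
--         return -1
--     for i in range(LP):
--         if not paragraph[i] in D: # Never seen word
--             D[paragraph[i]] = WordCounter(MinDistance=math.inf, LastSeenIdx=i)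
--         elif D[paragraph[i]].MinDistance == math.inf: # Seen word once
--             D[paragraph[i]] = WordCounter(
--                             MinDistance=i-D[paragraph[i]].LastSeenIdx,
--                             LastSeenIdx=i)
--         else: # Seen word 2+ times
--             D[paragraph[i]] = WordCounter(
--                         MinDistance=min(i-D[paragraph[i]].LastSeenIdx,
--                                         D[paragraph[i]].MinDistance),
--                         LastSeenIdx=i)
--         result = min(result, D[paragraph[i]].MinDistance)
--     return result if result < LP else -1
-- ===== SOURCE B (Python) =====
-- def textbook_inspired(paragraph):
--     # Group-by decomposition: one pass collects each word's index list,
--     # then a per-word scan over consecutive index gaps folds a global minimum.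
--     pos = {}
--     for i, w in enumerate(paragraph):
--         pos.setdefault(w, []).append(i)
--     best = -1
--     for idxs in pos.values():
--         for a, b in zip(idxs, idxs[1:]):
--             g = b - a
--             if best == -1 or g < best:
--                 best = g
--     return best
-- ===== Notes on version B (the rewrite author's own statement) =====
-- stated objective: alternative
-- what changed: Replaces the interleaved last-seen/min-distance state machine (per-word namedtuple rebuilt at every element, running min against math.inf, final result<len guard) with a group-by decomposition: one pass builds word -> list of indices, then a per-word scan over consecutive index gaps folds a global minimum with a -1 sentinel.
import Mathlib
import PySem

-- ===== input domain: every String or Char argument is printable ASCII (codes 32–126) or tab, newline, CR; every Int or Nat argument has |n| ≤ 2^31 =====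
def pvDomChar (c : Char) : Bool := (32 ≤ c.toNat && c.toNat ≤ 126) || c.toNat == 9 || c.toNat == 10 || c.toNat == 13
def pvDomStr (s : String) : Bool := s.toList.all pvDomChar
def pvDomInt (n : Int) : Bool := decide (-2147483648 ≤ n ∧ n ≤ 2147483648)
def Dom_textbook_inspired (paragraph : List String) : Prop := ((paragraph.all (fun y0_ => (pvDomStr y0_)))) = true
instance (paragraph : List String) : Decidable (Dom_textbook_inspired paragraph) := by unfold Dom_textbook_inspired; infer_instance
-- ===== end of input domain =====

-- B replaces A's interleaved last-seen/min-distance state machine by a group-by pass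
-- (word -> index list) followed by a per-word consecutive-gap scan; same cost, different decomposition.

-- ===== PORT A =====
-- Python's min with math.inf modelled as Option Int (none = inf)
def pyMinInf (a b : Option Int) : Option Int :=
  match a, b with
  | none, b => b
  | some x, none => some x
  | some x, some y => some (min x y)

def textbook_inspired (paragraph : List String) : Int :=
  let LP : Int := paragraph.length
  if LP < 2 then -1
  else
    let st := (PySem.List.pyRange 0 LP 1).foldl
      (fun (st : PySem.Dict String (Option Int × Int) × Option Int) i =>
        let D := st.1
        let result := st.2
        let w := PySem.List.pyGetD paragraph i ""
        let D' :=
          match D.get? w with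
          | none => D.insert w (none, i)                              -- never seen
          | some wc =>
            match wc.1 with
            | none => D.insert w (some (i - wc.2), i)                 -- seen once
            | some m => D.insert w (some (min (i - wc.2) m), i)       -- seen 2+ times
        let cur := (D'.get? w).getD (none, 0)
        (D', pyMinInf result cur.1))
      (PySem.Dict.empty, none)
    match st.2 with
    | none => -1
    | some r => if r < LP then r else -1

-- ===== PORT B =====
def textbook_inspired_alt (paragraph : List String) : Int :=
  let pos : PySem.Dict String (List Int) :=
    (PySem.List.enumerate paragraph 0).foldl
      (fun d q => d.modify q.2 [] (fun l => l ++ [q.1])) PySem.Dict.empty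
  pos.values.foldl
    (fun best idxs =>
      (idxs.zip idxs.tail).foldl
        (fun best ab =>
          let g := ab.2 - ab.1
          if best = -1 ∨ g < best then g else best)
        best)
    (-1)

-- ===== PRECONDITION & SPEC =====
def Spec_textbook_inspired (paragraph : List String) (out : Int) : Prop := out = textbook_inspired_alt paragraph
instance (paragraph : List String) (out : Int) : Decidable (Spec_textbook_inspired paragraph out) := by unfold Spec_textbook_inspired; infer_instance

-- ===== CLAIM (what is proved, stated in full; the proofs are below) =====
def Claim_equal_textbook_inspired : Prop := ∀ (paragraph : List String), Dom_textbook_inspired paragraph → Spec_textbook_inspired paragraph (textbook_inspired paragraph)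

-- ===== LEMMAS AND PROOFS =====

-- indices (as Int) at which word w occurs in p, in order
def occIn (p : List String) (w : String) : List Int :=
  (((PySem.List.enumerate p 0).map (fun q => (q.2, q.1))).filter (fun r => r.1 == w)).map (·.2)

-- consecutive differences
def gapsOf (l : List Int) : List Int := (l.zip l.tail).map (fun ab => ab.2 - ab.1)

def listMinO (l : List (Option Int)) : Option Int := l.foldl pyMinInf none

def minO' (gs : List Int) : Option Int := listMinO (gs.map some)

def lastIdx (p : List String) (w : String) : Int := (occIn p w).getLast?.getD 0

def mdOf (p : List String) (w : String) : Option Int := minO' (gapsOf (occIn p w))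

def wordsOf (p : List String) : List String := PySem.Set.ofList p

def itemsOf (p : List String) : List (String × (Option Int × Int)) :=
  (wordsOf p).map (fun w => (w, (mdOf p w, lastIdx p w)))

def resOf (p : List String) : Option Int := listMinO ((wordsOf p).map (fun w => mdOf p w))

-- A's loop body, on an (index, word) pair
def stepA (st : PySem.Dict String (Option Int × Int) × Option Int) (q : Int × String) :
    PySem.Dict String (Option Int × Int) × Option Int :=
  let D := st.1
  let result := st.2
  let i := q.1
  let w := q.2
  let D' :=
    match D.get? w with
    | none => D.insert w (none, i)
    | some wc =>
      match wc.1 with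
      | none => D.insert w (some (i - wc.2), i)
      | some m => D.insert w (some (min (i - wc.2) m), i)
  let cur := (D'.get? w).getD (none, 0)
  (D', pyMinInf result cur.1)

-- B's sentinel min step
def sentStep (b g : Int) : Int := if b = -1 ∨ g < b then g else b

-- pyMinInf algebra -----------------------------------------------------------
theorem pyMinInf_none_right (a : Option Int) : pyMinInf a none = a := by cases a <;> rfl

theorem pyMinInf_assoc (a b c : Option Int) : pyMinInf (pyMinInf a b) c = pyMinInf a (pyMinInf b c) := by
  cases a <;> cases b <;> cases c <;> simp [pyMinInf, min_assoc]

theorem pyMinInf_comm (a b : Option Int) : pyMinInf a b = pyMinInf b a := by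
  cases a <;> cases b <;> simp [pyMinInf, min_comm]

theorem pyMinInf_absorb (X o g : Option Int) :
    pyMinInf X (pyMinInf o g) = pyMinInf (pyMinInf X o) (pyMinInf o g) := by
  cases X <;> cases o <;> cases g <;> simp [pyMinInf]

theorem foldl_pyMinInf_start (l : List (Option Int)) (a : Option Int) :
    l.foldl pyMinInf a = pyMinInf a (listMinO l) := by
  induction l generalizing a with
  | nil => simp [listMinO, pyMinInf_none_right]
  | cons x t ih =>
    simp only [listMinO, List.foldl_cons] at *
    rw [ih (pyMinInf a x), ih (pyMinInf none x), ← pyMinInf_assoc]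
    rfl

theorem listMinO_append (l1 l2 : List (Option Int)) :
    listMinO (l1 ++ l2) = pyMinInf (listMinO l1) (listMinO l2) := by
  simp only [listMinO, List.foldl_append]
  rw [foldl_pyMinInf_start]
  rfl

theorem listMinO_middle (l1 l2 : List (Option Int)) (o : Option Int) :
    listMinO (l1 ++ o :: l2) = pyMinInf (listMinO (l1 ++ l2)) o := by
  rw [listMinO_append, listMinO_append]
  have h2 : listMinO (o :: l2) = pyMinInf o (listMinO l2) := by
    simp only [listMinO, List.foldl_cons]
    rw [foldl_pyMinInf_start]
    rfl
  rw [h2, pyMinInf_assoc, pyMinInf_comm o (listMinO l2), ← pyMinInf_assoc]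

theorem foldl_pyMinInf_mem (l : List (Option Int)) (a : Option Int) (r : Int)
    (h : l.foldl pyMinInf a = some r) : a = some r ∨ some r ∈ l := by
  induction l generalizing a with
  | nil => exact Or.inl h
  | cons x t ih =>
    simp only [List.foldl_cons] at h
    rcases ih (pyMinInf a x) h with h' | h'
    · match a, x, h' with
      | none, b, h' => right; simp [pyMinInf] at h'; simp [h']
      | some v, none, h' => left; simpa [pyMinInf] using h'
      | some v, some y, h' =>
        simp [pyMinInf] at h'
        rcases le_total v y with hle | hle
        · left; rw [min_eq_left hle] at h'; simp [h']
        · right; rw [min_eq_right hle] at h'; simp [h']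
    · simp [h']

theorem listMinO_mem (l : List (Option Int)) (r : Int) (h : listMinO l = some r) : some r ∈ l := by
  rcases foldl_pyMinInf_mem l none r h with h' | h'
  · exact absurd h' (by simp)
  · exact h'

-- occIn lemmas ---------------------------------------------------------------
theorem occIn_append (q : List String) (x w : String) :
    occIn (q ++ [x]) w = occIn q w ++ (if x == w then [(q.length : Int)] else []) := by
  simp only [occIn, PySem.List.enumerate_append, PySem.List.enumerate_cons,
    PySem.List.enumerate_nil, List.map_append, List.filter_append, List.map_append]
  congr 1
  by_cases hxw : x == w
  · simp [hxw]
  · simp [hxw]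

theorem occIn_eq_nil_iff (q : List String) (x : String) : occIn q x = [] ↔ x ∉ q := by
  rw [occIn, List.map_eq_nil_iff, List.filter_eq_nil_iff]
  constructor
  · intro h hx
    obtain ⟨k, hk, hq⟩ := List.mem_iff_getElem.mp hx
    have hmem : ((x, ((0 : Int) + (k : Int))) : String × Int) ∈
        (PySem.List.enumerate q 0).map (fun q => (q.2, q.1)) := by
      refine List.mem_map.mpr ⟨(((0 : Int) + (k : Int)), x), ?_, rfl⟩
      exact (PySem.List.mem_enumerate_iff _ _ _).mpr ⟨k, hk, by rw [hq]⟩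
    simpa using h _ hmem
  · intro h r hr hbeq
    obtain ⟨⟨i, v⟩, hmem, rfl⟩ := List.mem_map.mp hr
    obtain ⟨k, hk, hq⟩ := (PySem.List.mem_enumerate_iff _ _ _).mp hmem
    have hv : v = q[k] := congrArg Prod.snd hq
    simp only at hbeq
    have : v = x := by simpa using hbeq
    exact h (by rw [← this, hv]; exact List.getElem_mem hk)

theorem occIn_mem_bounds (p : List String) (w : String) (i : Int) (h : i ∈ occIn p w) :
    0 ≤ i ∧ i < (p.length : Int) := by
  simp only [occIn, List.mem_map, List.mem_filter, PySem.List.mem_enumerate_iff] at h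
  obtain ⟨r, ⟨⟨⟨j, v⟩, ⟨k, hk, hq⟩, rfl⟩, _⟩, rfl⟩ := h
  cases hq
  constructor <;> [positivity; exact_mod_cast by omega]

theorem occIn_pairwise (p : List String) (w : String) : (occIn p w).Pairwise (· < ·) := by
  have h1 : (PySem.List.enumerate p 0).Pairwise (fun a b => a.1 < b.1) :=
    PySem.List.pairwise_lt_enumerate p 0
  have h2 : ((PySem.List.enumerate p 0).map (fun q => (q.2, q.1))).Pairwise
      (fun a b => a.2 < b.2) := (List.pairwise_map).mpr h1
  have h3 := List.Pairwise.filter (fun r => r.1 == w) h2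
  exact (List.pairwise_map).mpr h3

theorem gapsOf_bounds (n : Int) (l : List Int) (hp : l.Pairwise (· < ·))
    (hb : ∀ i ∈ l, 0 ≤ i ∧ i < n) : ∀ g ∈ gapsOf l, 1 ≤ g ∧ g ≤ n - 1 := by
  induction l with
  | nil => simp [gapsOf]
  | cons a t ih =>
    cases t with
    | nil => simp [gapsOf]
    | cons b t' =>
      intro g hg
      have hab : a < b := (List.pairwise_cons.mp hp).1 b (by simp)
      have hgaps : gapsOf (a :: b :: t') = (b - a) :: gapsOf (b :: t') := rfl
      rw [hgaps] at hg
      rcases List.mem_cons.mp hg with rfl | hg'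
      · have ha := hb a (by simp)
        have hbb := hb b (by simp)
        omega
      · exact ih (List.Pairwise.of_cons hp) (fun i hi => hb i (by simp [hi])) g hg'

theorem gapsOf_append_singleton (l : List Int) (k : Int) (h : l ≠ []) :
    gapsOf (l ++ [k]) = gapsOf l ++ [k - l.getLast?.getD 0] := by
  induction l with
  | nil => simp at h
  | cons a t ih =>
    cases t with
    | nil => rfl
    | cons b t' =>
      have h1 : gapsOf ((a :: b :: t') ++ [k]) = (b - a) :: gapsOf ((b :: t') ++ [k]) := rfl
      have h2 : gapsOf (a :: b :: t') = (b - a) :: gapsOf (b :: t') := rfl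
      rw [h1, h2, ih (by simp)]
      simp

theorem mdOf_bounds (p : List String) (w : String) (r : Int) (h : mdOf p w = some r) :
    1 ≤ r ∧ r ≤ (p.length : Int) - 1 := by
  have hm := listMinO_mem _ _ h
  simp only [List.mem_map, Option.some.injEq] at hm
  obtain ⟨g, hg, rfl⟩ := hm
  exact gapsOf_bounds (p.length : Int) _ (occIn_pairwise p w)
    (fun i hi => occIn_mem_bounds p w i hi) g hg

theorem resOf_bounds (p : List String) (r : Int) (h : resOf p = some r) :
    1 ≤ r ∧ r ≤ (p.length : Int) - 1 := by
  have hm := listMinO_mem _ _ h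
  simp only [List.mem_map] at hm
  obtain ⟨w, _, hw⟩ := hm
  exact mdOf_bounds p w r hw

-- dict of a nodup key->value map --------------------------------------------
theorem get?_mk_map (s : List String) (f : String → Option Int × Int) (x : String) (hs : s.Nodup) :
    (PySem.Dict.mk (s.map (fun w => (w, f w)))).get? x = if x ∈ s then some (f x) else none := by
  induction s with
  | nil => simp [PySem.Dict.get?]
  | cons a t ih =>
    rw [List.map_cons, PySem.Dict.get?_mk_cons]
    by_cases hax : a = x
    · subst hax
      simp
    · have : (a == x) = false := by simpa using hax
      rw [this]
      simp only [Bool.false_eq_true, if_false]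
      rw [ih (List.Nodup.of_cons hs)]
      simp [List.mem_cons, Ne.symm hax]

-- unchanged-word lemmas
theorem occ_unchanged (q : List String) (x w : String) (hne : x ≠ w) :
    occIn (q ++ [x]) w = occIn q w := by
  rw [occIn_append]
  simp [hne]

theorem keys_mk_map (s : List String) (f : String → Option Int × Int) :
    (PySem.Dict.mk (s.map (fun w => (w, f w)))).keys = s := by
  simp only [PySem.Dict.keys, List.map_map]
  exact List.map_id' s

theorem occIn_snoc_self (q : List String) (x : String) :
    occIn (q ++ [x]) x = occIn q x ++ [(q.length : Int)] := by
  rw [occIn_append]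
  simp

theorem mdOf_snoc_self (q : List String) (x : String) (hx : x ∈ q) :
    mdOf (q ++ [x]) x = pyMinInf (mdOf q x) (some ((q.length : Int) - lastIdx q x)) := by
  have hnn : occIn q x ≠ [] := fun h => ((occIn_eq_nil_iff q x).mp h) hx
  rw [mdOf, occIn_snoc_self, gapsOf_append_singleton _ _ hnn]
  rw [minO', List.map_append, listMinO_append]
  rfl

theorem lastIdx_snoc_self (q : List String) (x : String) :
    lastIdx (q ++ [x]) x = (q.length : Int) := by
  rw [lastIdx, occIn_snoc_self]
  simp

-- A's snoc step
theorem wordsOf_snoc_mem (q : List String) (x : String) (hx : x ∈ q) :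
    wordsOf (q ++ [x]) = wordsOf q := by
  rw [wordsOf, PySem.Set.ofList_append_singleton,
    PySem.Set.add_of_mem ((PySem.Set.mem_ofList q x).mpr hx)]
  rfl

theorem wordsOf_snoc_not_mem (q : List String) (x : String) (hx : x ∉ q) :
    wordsOf (q ++ [x]) = wordsOf q ++ [x] := by
  rw [wordsOf, PySem.Set.ofList_append_singleton,
    PySem.Set.add_of_not_mem (fun h => hx ((PySem.Set.mem_ofList q x).mp h))]
  rfl

theorem fq_unchanged (q : List String) (x w : String) (hne : x ≠ w) :
    (mdOf (q ++ [x]) w, lastIdx (q ++ [x]) w) = (mdOf q w, lastIdx q w) := by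
  rw [mdOf, mdOf, lastIdx, lastIdx, occ_unchanged q x w hne]

theorem stepA_snoc (q : List String) (x : String) :
    stepA (PySem.Dict.mk (itemsOf q), resOf q) ((q.length : Int), x) =
      (PySem.Dict.mk (itemsOf (q ++ [x])), resOf (q ++ [x])) := by
  have hnodup : (wordsOf q).Nodup := PySem.Set.nodup_ofList q
  have hkeys : (PySem.Dict.mk (itemsOf q)).keys = wordsOf q :=
    keys_mk_map (wordsOf q) (fun w => (mdOf q w, lastIdx q w))
  have hget : (PySem.Dict.mk (itemsOf q)).get? x =
      if x ∈ wordsOf q then some (mdOf q x, lastIdx q x) else none :=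
    get?_mk_map (wordsOf q) (fun w => (mdOf q w, lastIdx q w)) x hnodup
  by_cases hx : x ∈ q
  · -- seen word: the entry at x is replaced in place
    have hxw : x ∈ wordsOf q := (PySem.Set.mem_ofList q x).mpr hx
    rw [if_pos hxw] at hget
    have hcont : (PySem.Dict.mk (itemsOf q)).contains x = true := by
      rw [PySem.Dict.contains_iff_mem_keys, hkeys]; exact hxw
    set g : Int := (q.length : Int) - lastIdx q x with hg
    -- dict component, for the uniform inserted value
    have hitems : ∀ v : Option Int × Int, v = (pyMinInf (mdOf q x) (some g), (q.length : Int)) →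
        ((PySem.Dict.mk (itemsOf q)).insert x v) = PySem.Dict.mk (itemsOf (q ++ [x])) := by
      rintro v rfl
      apply PySem.Dict.ext
      rw [PySem.Dict.items_insert_of_contains _ _ hcont]
      show _ = itemsOf (q ++ [x])
      rw [itemsOf, itemsOf, wordsOf_snoc_mem q x hx, List.map_map]
      refine List.map_congr_left ?_
      intro w hw
      simp only [Function.comp]
      by_cases hwx : w = x
      · subst hwx
        rw [if_pos (by simp)]
        rw [Prod.mk.injEq]
        refine ⟨rfl, ?_⟩
        rw [mdOf_snoc_self q w hx, lastIdx_snoc_self]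
      · rw [if_neg (by simpa using hwx)]
        rw [Prod.mk.injEq]
        exact ⟨rfl, (fq_unchanged q x w (Ne.symm hwx)).symm⟩
    -- result component
    obtain ⟨s1, s2, hsplit⟩ := List.append_of_mem hxw
    have hnd : (s1 ++ x :: s2).Nodup := hsplit ▸ hnodup
    have hx1 : x ∉ s1 := fun h => (List.disjoint_of_nodup_append hnd) h (by simp)
    have hx2 : x ∉ s2 := by
      have := (List.nodup_append.mp hnd).2.1
      simp at this
      exact this.1
    have e1 : List.map (fun w => mdOf (q ++ [x]) w) s1 = List.map (fun w => mdOf q w) s1 :=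
      List.map_congr_left (fun w hw => by
        rw [mdOf, mdOf, occ_unchanged q x w (fun h => hx1 (h ▸ hw))])
    have e2 : List.map (fun w => mdOf (q ++ [x]) w) s2 = List.map (fun w => mdOf q w) s2 :=
      List.map_congr_left (fun w hw => by
        rw [mdOf, mdOf, occ_unchanged q x w (fun h => hx2 (h ▸ hw))])
    have hres : resOf (q ++ [x]) = pyMinInf (resOf q) (pyMinInf (mdOf q x) (some g)) := by
      rw [resOf, resOf, wordsOf_snoc_mem q x hx, hsplit, List.map_append, List.map_cons,
        List.map_append, List.map_cons, e1, e2, listMinO_middle, listMinO_middle,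
        mdOf_snoc_self q x hx, ← hg, pyMinInf_absorb]
    -- discharge the two seen-branches of A's match
    simp only [stepA, hget]
    rcases hmdx : mdOf q x with _ | m
    · simp only [PySem.Dict.get?_insert_self, Option.getD_some]
      rw [Prod.mk.injEq]
      constructor
      · exact hitems _ (by rw [hmdx]; rfl)
      · rw [hres, hmdx]
        rfl
    · simp only [PySem.Dict.get?_insert_self, Option.getD_some]
      rw [Prod.mk.injEq]
      constructor
      · refine hitems _ ?_
        rw [hmdx]
        simp only [pyMinInf, ← hg]
        rw [min_comm]
      · rw [hres, hmdx]
        simp only [pyMinInf, ← hg]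
        rw [min_comm]
  · -- new word: entry appended, result unchanged
    have hxw : x ∉ wordsOf q := fun h => hx ((PySem.Set.mem_ofList q x).mp h)
    rw [if_neg hxw] at hget
    have hcont : (PySem.Dict.mk (itemsOf q)).contains x = false := by
      rw [← Bool.not_eq_true, PySem.Dict.contains_iff_mem_keys, hkeys]
      exact hxw
    have hocc : occIn (q ++ [x]) x = [(q.length : Int)] := by
      rw [occIn_snoc_self, (occIn_eq_nil_iff q x).mpr hx]
      rfl
    have hmdx : mdOf (q ++ [x]) x = none := by rw [mdOf, hocc]; rfl
    have hitems : itemsOf (q ++ [x]) = itemsOf q ++ [(x, (none, (q.length : Int)))] := by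
      rw [itemsOf, itemsOf, wordsOf_snoc_not_mem q x hx, List.map_append]
      congr 1
      · refine List.map_congr_left ?_
        intro w hw
        have hne : x ≠ w := fun h => hxw (h ▸ hw)
        rw [Prod.mk.injEq]
        exact ⟨rfl, (fq_unchanged q x w hne)⟩
      · simp [hmdx, lastIdx_snoc_self]
    have e3 : List.map (fun w => mdOf (q ++ [x]) w) (wordsOf q) =
        List.map (fun w => mdOf q w) (wordsOf q) :=
      List.map_congr_left (fun w hw => by
        rw [mdOf, mdOf, occ_unchanged q x w (fun h => hxw (h ▸ hw))])
    have hres : resOf (q ++ [x]) = resOf q := by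
      rw [resOf, resOf, wordsOf_snoc_not_mem q x hx, List.map_append, listMinO_append, e3]
      rw [show listMinO (List.map (fun w => mdOf (q ++ [x]) w) [x]) = none from by
        simp [listMinO, hmdx, pyMinInf]]
      rw [pyMinInf_none_right]
    simp only [stepA, hget]
    simp only [PySem.Dict.get?_insert_self, Option.getD_some]
    rw [Prod.mk.injEq]
    constructor
    · apply PySem.Dict.ext
      rw [PySem.Dict.items_insert_of_not_contains _ _ hcont]
      show _ = itemsOf (q ++ [x])
      rw [hitems]
    · rw [pyMinInf_none_right, hres]

-- A's fold computes itemsOf / resOf ------------------------------------------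
theorem foldA_eq (p : List String) :
    (PySem.List.enumerate p 0).foldl stepA (PySem.Dict.empty, none) =
      (PySem.Dict.mk (itemsOf p), resOf p) := by
  induction p using List.reverseRecOn with
  | nil => rfl
  | append_singleton q x ih =>
    rw [PySem.List.enumerate_append, List.foldl_append, ih]
    rw [show PySem.List.enumerate [x] (0 + (q.length : Int)) = [((q.length : Int), x)] from by
      rw [PySem.List.enumerate_cons]
      simp]
    simpa using stepA_snoc q x

-- B helper lemmas -------------------------------------------------------------
theorem values_eq_map_keys {κ ν : Type} [BEq κ] [LawfulBEq κ] (d : PySem.Dict κ ν) (dflt : ν)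
    (h : (PySem.Dict.keys d).Nodup) :
    PySem.Dict.values d = (PySem.Dict.keys d).map (fun k => PySem.Dict.getD d k dflt) := by
  simp only [PySem.Dict.values, PySem.Dict.keys, List.map_map]
  refine (List.map_congr_left ?_).symm
  intro pr hpr
  simp only [Function.comp]
  exact PySem.Dict.getD_of_mem_items d (by simpa using hpr) h dflt

def posOf (p : List String) : PySem.Dict String (List Int) :=
  (PySem.List.enumerate p 0).foldl
    (fun d q => d.modify q.2 [] (fun l => l ++ [q.1])) PySem.Dict.empty

theorem posOf_getD (p : List String) (w : String) : (posOf p).getD w [] = occIn p w := by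
  have hrw : posOf p = ((PySem.List.enumerate p 0).map (fun q => (q.2, q.1))).foldl
      (fun d r => d.modify r.1 [] (fun l => l ++ [r.2])) PySem.Dict.empty := by
    rw [List.foldl_map]
    rfl
  rw [hrw, PySem.Dict.getD_foldl_modify_append, PySem.Dict.getD_empty]
  rfl

theorem posOf_keys (p : List String) : (posOf p).keys = wordsOf p := by
  rw [posOf, PySem.Dict.keys_foldl_modify_key (PySem.List.enumerate p 0) (fun q => q.2) []
    (fun _ q => fun l => l ++ [q.1]) PySem.Dict.empty]
  rw [PySem.Dict.keys_empty, PySem.Set.update_nil_left, PySem.List.map_snd_enumerate]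
  rfl

theorem posOf_keys_nodup (p : List String) : (posOf p).keys.Nodup := by
  rw [posOf_keys]
  exact PySem.Set.nodup_ofList p

-- sentinel relation -----------------------------------------------------------
def SentRel (b : Int) (m : Option Int) : Prop := (b = -1 ∧ m = none) ∨ (1 ≤ b ∧ m = some b)

theorem sent_step_rel (b g : Int) (m : Option Int) (hg : 1 ≤ g) (h : SentRel b m) :
    SentRel (sentStep b g) (pyMinInf m (some g)) := by
  rcases h with ⟨hb, hm⟩ | ⟨hb, hm⟩
  · subst hb; subst hm
    right
    constructor
    · exact hg
    · rfl
  · subst hm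
    right
    rw [sentStep]
    by_cases hlt : g < b
    · rw [if_pos (Or.inr hlt)]
      refine ⟨hg, ?_⟩
      simp [pyMinInf]
      omega
    · rw [if_neg (by omega)]
      refine ⟨hb, ?_⟩
      simp [pyMinInf]
      omega

theorem sent_fold_rel (gs : List Int) (b : Int) (m : Option Int)
    (hg : ∀ g ∈ gs, 1 ≤ g) (h : SentRel b m) :
    SentRel (gs.foldl sentStep b) (gs.foldl (fun a g => pyMinInf a (some g)) m) := by
  induction gs generalizing b m with
  | nil => exact h
  | cons g gt ih =>
    simp only [List.foldl_cons]
    exact ih _ _ (fun g' hg' => hg g' (List.mem_cons_of_mem _ hg'))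
      (sent_step_rel b g m (hg g (by simp)) h)

theorem B_eq (p : List String) : textbook_inspired_alt p = (resOf p).getD (-1) := by
  have h0 : textbook_inspired_alt p = (posOf p).values.foldl
      (fun best idxs => (idxs.zip idxs.tail).foldl
        (fun best ab => let g := ab.2 - ab.1; if best = -1 ∨ g < best then g else best) best)
      (-1) := rfl
  rw [h0, values_eq_map_keys (posOf p) [] (posOf_keys_nodup p), posOf_keys]
  rw [show (wordsOf p).map (fun k => (posOf p).getD k []) = (wordsOf p).map (fun k => occIn p k)
    from List.map_congr_left (fun w _ => posOf_getD p w)]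
  rw [List.foldl_map]
  have main : ∀ (ws : List String) (b : Int) (m : Option Int), SentRel b m →
      SentRel (ws.foldl (fun best w => (((occIn p w).zip (occIn p w).tail).foldl
          (fun best ab => let g := ab.2 - ab.1; if best = -1 ∨ g < best then g else best) best)) b)
        (ws.foldl (fun m w => pyMinInf m (mdOf p w)) m) := by
    intro ws
    induction ws with
    | nil => intro b m h; exact h
    | cons w wt ih =>
      intro b m h
      simp only [List.foldl_cons]
      apply ih
      have hz : ((occIn p w).zip (occIn p w).tail).foldl
          (fun best ab => let g := ab.2 - ab.1; if best = -1 ∨ g < best then g else best) b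
          = (gapsOf (occIn p w)).foldl sentStep b := by
        rw [gapsOf, List.foldl_map]
        rfl
      have hm' : (gapsOf (occIn p w)).foldl (fun a g => pyMinInf a (some g)) m
          = pyMinInf m (mdOf p w) := by
        rw [mdOf, minO']
        rw [show (gapsOf (occIn p w)).foldl (fun a g => pyMinInf a (some g)) m
            = ((gapsOf (occIn p w)).map some).foldl pyMinInf m from by rw [List.foldl_map]]
        rw [foldl_pyMinInf_start]
      rw [hz, ← hm']
      exact sent_fold_rel _ b m
        (fun g hg => (gapsOf_bounds (p.length : Int) _ (occIn_pairwise p w)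
          (fun i hi => occIn_mem_bounds p w i hi) g hg).1) h
  have hfin := main (wordsOf p) (-1) none (Or.inl ⟨rfl, rfl⟩)
  have hres : (wordsOf p).foldl (fun m w => pyMinInf m (mdOf p w)) none = resOf p := by
    rw [resOf, listMinO, List.foldl_map]
  rw [hres] at hfin
  rcases hfin with ⟨hb, hm⟩ | ⟨hb, hm⟩
  · rw [hb, hm]
    rfl
  · rw [hm] at *
    rw [hm]
    simp

-- ===== VERDICT (by name: the statement is the Claim_ definition above) =====
theorem resOf_singleton (x : String) : resOf [x] = none := by
  have hw : wordsOf [x] = [x] := rfl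
  have hocc : occIn [x] x = [((0 : Int) + 0)] := by
    simp [occIn, PySem.List.enumerate_cons, PySem.List.enumerate_nil]
  have hmd : mdOf [x] x = none := by
    rw [mdOf, hocc]
    rfl
  rw [resOf, hw, List.map_cons, List.map_nil, hmd]
  rfl

theorem textbook_inspired_spec : Claim_equal_textbook_inspired := by
  intro p _
  show textbook_inspired p = textbook_inspired_alt p
  rw [B_eq]
  have h0 : textbook_inspired p =
      (if (p.length : Int) < 2 then -1
       else
         match ((PySem.List.pyRange 0 ((p.length : Int)) 1).foldl
           (fun (st : PySem.Dict String (Option Int × Int) × Option Int) i =>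
             let D := st.1
             let result := st.2
             let w := PySem.List.pyGetD p i ""
             let D' :=
               match D.get? w with
               | none => D.insert w (none, i)
               | some wc =>
                 match wc.1 with
                 | none => D.insert w (some (i - wc.2), i)
                 | some m => D.insert w (some (min (i - wc.2) m), i)
             let cur := (D'.get? w).getD (none, 0)
             (D', pyMinInf result cur.1))
           (PySem.Dict.empty, none)).2 with
         | none => -1
         | some r => if r < (p.length : Int) then r else -1) := rfl
  rw [h0]
  by_cases hLP : (p.length : Int) < 2
  · rw [if_pos hLP]
    rcases p with _ | ⟨x, _ | ⟨y, t⟩⟩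
    · rfl
    · rw [resOf_singleton x]
      rfl
    · exact absurd hLP (by simp)
  · rw [if_neg hLP]
    have hfold : ((PySem.List.pyRange 0 ((p.length : Int)) 1).foldl
        (fun (st : PySem.Dict String (Option Int × Int) × Option Int) i =>
          let D := st.1
          let result := st.2
          let w := PySem.List.pyGetD p i ""
          let D' :=
            match D.get? w with
            | none => D.insert w (none, i)
            | some wc =>
              match wc.1 with
              | none => D.insert w (some (i - wc.2), i)
              | some m => D.insert w (some (min (i - wc.2) m), i)
          let cur := (D'.get? w).getD (none, 0)
          (D', pyMinInf result cur.1))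
        (PySem.Dict.empty, none)) = (PySem.List.enumerate p 0).foldl stepA (PySem.Dict.empty, none) := by
      rw [PySem.List.enumerate_eq_map_pyRange p "", List.foldl_map]
      rfl
    rw [hfold, foldA_eq]
    show (match resOf p with
      | none => -1
      | some r => if r < (p.length : Int) then r else -1) = (resOf p).getD (-1)
    cases hr : resOf p with
    | none => rfl
    | some r =>
      have hb := resOf_bounds p r hr
      show (if r < (p.length : Int) then r else -1) = r
      rw [if_pos (by omega)]
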